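-- pv_equiv track=rewrite | github.com/KhoiBui16/28Tech_Code_Online | Python/Source Code Python Contest/Contest_10_ChuoiKyTu/Bai34_SoDep_3.py | is_beaty
-- ===== SOURCE A (Python) =====
-- def is_beaty(n: str):
--     checked_increased = True
--     checked_decreased = True
--
--     for i in range(len(n) - 1):
--         if n[i] > n[i + 1]:
--             checked_increased = False
--         if n[i] < n[i + 1]:
--             checked_decreased = False
--
--     return checked_increased or checked_decreased
-- ===== SOURCE B (Python) =====
-- def is_beaty(n: str):
--     l = list(n)
--     return l == sorted(l) or l == sorted(l, reverse=True)
-- ===== Notes on version B (the rewrite author's own statement) =====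
-- stated objective: simpler
-- what changed: Replaces the index loop maintaining two flags with two sort-and-compare equality checks: the string is monotone iff it equals its ascending or descending character sort.
import Mathlib
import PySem

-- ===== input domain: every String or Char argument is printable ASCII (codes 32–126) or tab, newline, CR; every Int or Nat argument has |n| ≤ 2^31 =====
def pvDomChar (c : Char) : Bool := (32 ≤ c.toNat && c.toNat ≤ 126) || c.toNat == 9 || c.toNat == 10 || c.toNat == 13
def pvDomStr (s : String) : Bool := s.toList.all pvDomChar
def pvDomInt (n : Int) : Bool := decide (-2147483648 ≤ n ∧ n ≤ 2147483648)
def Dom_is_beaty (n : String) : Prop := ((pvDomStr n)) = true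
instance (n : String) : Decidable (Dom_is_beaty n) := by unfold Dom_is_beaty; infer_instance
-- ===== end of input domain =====

-- B replaces A's flag-maintaining index loop with two sort-and-compare equality checks (simpler decomposition, not faster).


-- ===== PORT A =====
-- one step of A's loop body: the two 'if's in order, updating the (increased, decreased) flag pair
def isBeatyStep (cs : List Char) (st : Bool × Bool) (i : Int) : Bool × Bool :=
  let st := if PySem.List.pyGetD cs i 'a' > PySem.List.pyGetD cs (i + 1) 'a' then (false, st.2) else st
  if PySem.List.pyGetD cs i 'a' < PySem.List.pyGetD cs (i + 1) 'a' then (st.1, false) else st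

def is_beaty (n : String) : Bool :=
  let cs := n.toList
  let st := (PySem.List.pyRange 0 ((cs.length : Int) - 1)).foldl (isBeatyStep cs) (true, true)
  st.1 || st.2

-- ===== PORT B =====
def is_beaty_alt (n : String) : Bool :=
  let l := n.toList
  (l == PySem.List.sorted l (fun x => x)) || (l == PySem.List.sorted l (fun x => x) true)

-- ===== PRECONDITION & SPEC =====
def Spec_is_beaty (n : String) (out : Bool) : Prop := out = is_beaty_alt n
instance (n : String) (out : Bool) : Decidable (Spec_is_beaty n out) := by unfold Spec_is_beaty; infer_instance

-- ===== CLAIM (what is proved, stated in full; the proofs are below) =====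
def Claim_equal_is_beaty : Prop := ∀ (n : String), Dom_is_beaty n → Spec_is_beaty n (is_beaty n)

-- ===== LEMMAS AND PROOFS =====

-- A's fold computes the two monotonicity flags of the consecutive-pair chains
theorem pyGetD_append_lt (cs : List Char) (c : Char) (j : Int) (h0 : 0 ≤ j)
    (h1 : j < (cs.length : Int)) :
    PySem.List.pyGetD (cs ++ [c]) j 'a' = PySem.List.pyGetD cs j 'a' := by
  rw [PySem.List.pyGetD_eq_getElem _ _ h0 (by simp; omega),
      PySem.List.pyGetD_eq_getElem _ _ h0 h1]
  exact List.getElem_append_left (by omega)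

theorem foldA_eq (cs : List Char) :
    (PySem.List.pyRange 0 ((cs.length : Int) - 1)).foldl (isBeatyStep cs) (true, true)
      = (decide (List.IsChain (· ≤ ·) cs), decide (List.IsChain (· ≥ ·) cs)) := by
  induction cs using List.reverseRecOn with
  | nil => simp
  | append_singleton cs c ih =>
    rcases eq_or_ne cs [] with rfl | hne
    · simp
    · have hlen : 1 ≤ cs.length := List.length_pos_iff.mpr hne
      have hb : ((cs ++ [c]).length : Int) - 1 = ((cs.length : Int) - 1) + 1 := by
        simp
      rw [hb, PySem.List.pyRange_one_succ_right (by omega : (0:Int) ≤ (cs.length : Int) - 1),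
          List.foldl_append]
      have hcongr : (PySem.List.pyRange 0 ((cs.length : Int) - 1)).foldl
            (isBeatyStep (cs ++ [c])) (true, true)
          = (PySem.List.pyRange 0 ((cs.length : Int) - 1)).foldl (isBeatyStep cs) (true, true) := by
        apply PySem.List.foldl_congr_mem
        intro acc i hi
        rw [PySem.List.mem_pyRange_one] at hi
        unfold isBeatyStep
        rw [pyGetD_append_lt cs c i hi.1 (by omega),
            pyGetD_append_lt cs c (i + 1) (by omega) (by omega)]
      rw [hcongr, ih]
      have h1 : PySem.List.pyGetD (cs ++ [c]) ((cs.length : Int) - 1) 'a' = cs.getLast hne := by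
        rw [pyGetD_append_lt cs c _ (by omega) (by omega),
            PySem.List.pyGetD_eq_getElem _ _ (by omega) (by omega)]
        have : ((cs.length : Int) - 1).toNat = cs.length - 1 := by omega
        rw [List.getLast_eq_getElem]
        congr 1
      have h2 : PySem.List.pyGetD (cs ++ [c]) ((cs.length : Int) - 1 + 1) 'a' = c := by
        have he : (cs.length : Int) - 1 + 1 = (cs.length : Int) := by ring
        rw [he, PySem.List.pyGetD_eq_getElem _ _ (by omega) (by simp)]
        simp
      have hlast : List.IsChain (· ≤ ·) (cs ++ [c]) ↔
          List.IsChain (· ≤ ·) cs ∧ cs.getLast hne ≤ c := by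
        simp [List.isChain_append, List.getLast?_eq_some_getLast (h := hne)]
      have hlast' : List.IsChain (· ≥ ·) (cs ++ [c]) ↔
          List.IsChain (· ≥ ·) cs ∧ c ≤ cs.getLast hne := by
        simp [List.isChain_append, List.getLast?_eq_some_getLast (h := hne)]
      simp only [List.foldl_cons, List.foldl_nil, isBeatyStep, h1, h2]
      rcases lt_trichotomy (cs.getLast hne) c with h | h | h
      · simp [hlast, hlast', h, h.le, h.asymm, not_le.mpr h]
      · subst h; simp [hlast, hlast']
      · simp [hlast, hlast', h, h.le, h.asymm, not_le.mpr h]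

theorem eq_sorted_iff (l : List Char) :
    (l == PySem.List.sorted l (fun x => x)) = decide (List.IsChain (· ≤ ·) l) := by
  rw [Bool.eq_iff_iff]
  simp only [beq_iff_eq, decide_eq_true_eq]
  constructor
  · intro h
    exact List.isChain_iff_pairwise.mpr (h ▸ PySem.List.sorted_pairwise l (fun x => x))
  · intro h
    exact (PySem.List.sorted_eq_self_of_pairwise l _ h.pairwise).symm

theorem eq_sorted_rev_iff (l : List Char) :
    (l == PySem.List.sorted l (fun x => x) true) = decide (List.IsChain (· ≥ ·) l) := by
  rw [Bool.eq_iff_iff]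
  simp only [beq_iff_eq, decide_eq_true_eq]
  constructor
  · intro h
    exact List.isChain_iff_pairwise.mpr (h ▸ PySem.List.sorted_pairwise_rev l (fun x => x))
  · intro h
    exact (PySem.List.sorted_rev_eq_self_of_pairwise l _ h.pairwise).symm

-- ===== VERDICT (by name: the statement is the Claim_ definition above) =====
theorem is_beaty_spec : Claim_equal_is_beaty := by
  intro n _
  unfold Spec_is_beaty is_beaty is_beaty_alt
  simp only [foldA_eq, eq_sorted_iff, eq_sorted_rev_iff]
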